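-- pv_equiv track=rewrite | github.com/milairhu/SAToku | sudoku.py | variable_to_cell
-- ===== SOURCE A (Python) =====
-- from typing import List, Tuple
--
-- def variable_to_cell(var: int) -> Tuple[int, int, int]:
--     v=0
--     for i in range (0,9):
--         for j in range (0,9):
--             for val in range (1,10):
--                 v=v+1
--                 if (v==var):
--                     return (i,j,val)
-- ===== SOURCE B (Python) =====
-- from typing import Tuple
--
-- def variable_to_cell(var: int) -> Tuple[int, int, int]:
--     if 1 <= var <= 729:
--         idx = var - 1
--         return (idx // 81, (idx // 9) % 9, idx % 9 + 1)
-- ===== Notes on version B (the rewrite author's own statement) =====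
-- stated objective: simpler
-- what changed: Replaced the triple nested counting loop by a direct closed-form decomposition of the variable index with integer division and modulo.
-- outside the precondition, e.g. on variable_to_cell(0): A returns None, B returns None; on variable_to_cell(730): A returns None, B returns None
import Mathlib
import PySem

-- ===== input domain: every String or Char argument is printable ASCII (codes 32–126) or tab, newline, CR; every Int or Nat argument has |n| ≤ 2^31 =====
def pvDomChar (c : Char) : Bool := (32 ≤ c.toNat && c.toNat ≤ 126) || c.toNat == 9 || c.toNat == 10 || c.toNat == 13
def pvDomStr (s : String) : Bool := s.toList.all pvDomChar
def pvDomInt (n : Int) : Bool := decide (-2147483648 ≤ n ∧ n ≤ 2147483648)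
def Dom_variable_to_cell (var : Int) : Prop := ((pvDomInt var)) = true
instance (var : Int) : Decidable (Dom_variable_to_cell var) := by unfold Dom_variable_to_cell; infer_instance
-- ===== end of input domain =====

-- B replaces A's triple nested counting loop by a closed-form index decomposition (simpler).


-- ===== PORT A =====
-- Literal port of A's triple nested loop with counter v and early return (early return
-- modelled by the Option in the accumulator: once some, nothing changes).
def variable_to_cell (var : Int) : Int × Int × Int :=
  let r : Int × Option (Int × Int × Int) :=
    (PySem.List.pyRange 0 9 1).foldl (fun acc i =>
      (PySem.List.pyRange 0 9 1).foldl (fun acc j =>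
        (PySem.List.pyRange 1 10 1).foldl (fun acc val =>
          match acc with
          | (_, some _) => acc
          | (v, none) =>
            let v' := v + 1
            if v' = var then (v', some (i, j, val)) else (v', none)) acc) acc)
      (0, none)
  (r.2).getD (0, 0, 0)   -- Python returns None outside 1..729; those inputs are excluded by Pre_

-- ===== PORT B =====
-- Closed form: idx = var-1; (idx//81, (idx//9)%9, idx%9+1); outside 1..729 Python B
-- falls through (None), excluded by Pre_.
def variable_to_cell_alt (var : Int) : Int × Int × Int :=
  if 1 ≤ var ∧ var ≤ 729 then
    let idx := var - 1
    (PySem.Int.floordiv idx 81, PySem.Int.mod (PySem.Int.floordiv idx 9) 9,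
      PySem.Int.mod idx 9 + 1)
  else (0, 0, 0)

-- ===== PRECONDITION & SPEC =====
-- Pre_ excludes var outside 1..729, where A falls off the loop and returns None (not an int triple).
def Pre_variable_to_cell (var : Int) : Prop := 1 ≤ var ∧ var ≤ 729
instance (var : Int) : Decidable (Pre_variable_to_cell var) := by unfold Pre_variable_to_cell; infer_instance
def pvWitness_variable_to_cell : Int := (5)
def Spec_variable_to_cell (var : Int) (out : Int × Int × Int) : Prop := out = variable_to_cell_alt var
instance (var : Int) (out : Int × Int × Int) : Decidable (Spec_variable_to_cell var out) := by unfold Spec_variable_to_cell; infer_instance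

-- ===== CLAIM (what is proved, stated in full; the proofs are below) =====
def Claim_equal_variable_to_cell : Prop := ∀ (var : Int), Dom_variable_to_cell var → Pre_variable_to_cell var → Spec_variable_to_cell var (variable_to_cell var)

-- ===== LEMMAS AND PROOFS =====

-- A's loop step, abstracted over the produced triple.
def pvStep (var : Int) (acc : Int × Option (Int × Int × Int)) (t : Int × Int × Int) :
    Int × Option (Int × Int × Int) :=
  match acc with
  | (_, some _) => acc
  | (v, none) =>
    let v' := v + 1
    if v' = var then (v', some t) else (v', none)

-- the 729 triples A enumerates, in A's order
def pvL : List (Int × Int × Int) :=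
  (PySem.List.pyRange 0 9 1).flatMap (fun i =>
    (PySem.List.pyRange 0 9 1).flatMap (fun j =>
      (PySem.List.pyRange 1 10 1).map (fun val => (i, j, val))))

theorem pv_foldl_flatMap {α β σ : Type} (l : List α) (f : α → List β) (g : σ → β → σ)
    (s : σ) : (l.flatMap f).foldl g s = l.foldl (fun acc x => (f x).foldl g acc) s := by
  induction l generalizing s with
  | nil => rfl
  | cons a t ih => simp [List.flatMap_cons, List.foldl_append, ih]

theorem pv_A_flat (var : Int) :
    variable_to_cell var = ((pvL.foldl (pvStep var) (0, none)).2).getD (0, 0, 0) := by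
  unfold variable_to_cell pvL
  simp only [pv_foldl_flatMap, List.foldl_map]
  rfl

theorem pv_step_some (var v : Int) (x : Int × Int × Int) (L : List (Int × Int × Int)) :
    L.foldl (pvStep var) (v, some x) = (v, some x) := by
  induction L with
  | nil => rfl
  | cons a t ih => simpa [pvStep] using ih

theorem pv_fold_char (var : Int) (L : List (Int × Int × Int)) (v0 : Int) :
    L.foldl (pvStep var) (v0, none) =
      if v0 < var ∧ var ≤ v0 + L.length then (var, L[(var - v0 - 1).toNat]?)
      else (v0 + (L.length : Int), none) := by
  induction L generalizing v0 with
  | nil =>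
    simp only [List.foldl_nil, List.length_nil]
    rw [if_neg (by omega)]
    simp
  | cons a t ih =>
    simp only [List.foldl_cons]
    by_cases h : v0 + 1 = var
    · have hstep : pvStep var (v0, none) a = (var, some a) := by
        simp [pvStep, h]
      rw [hstep, pv_step_some]
      rw [if_pos (by simp [List.length_cons]; omega)]
      have : (var - v0 - 1).toNat = 0 := by omega
      simp [this]
    · have hstep : pvStep var (v0, none) a = (v0 + 1, none) := by
        simp [pvStep, h]
      rw [hstep, ih (v0 + 1)]
      by_cases hc : v0 + 1 < var ∧ var ≤ v0 + 1 + t.length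
      · rw [if_pos hc, if_pos (by simp [List.length_cons]; omega)]
        have hidx : (var - v0 - 1).toNat = (var - (v0 + 1) - 1).toNat + 1 := by omega
        simp [hidx]
      · rw [if_neg hc, if_neg (by simp [List.length_cons]; omega)]
        simp [List.length_cons]; ring
set_option maxRecDepth 4000 in
theorem pvL_eq : pvL = (List.range 729).map (fun n : Nat => variable_to_cell_alt (Int.ofNat n + 1)) := by
  decide

-- ===== VERDICT (by name: the statement is the Claim_ definition above) =====
theorem variable_to_cell_spec : Claim_equal_variable_to_cell := by
  intro var _ hpre
  obtain ⟨h1, h2⟩ := hpre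
  unfold Spec_variable_to_cell
  rw [pv_A_flat, pv_fold_char]
  have hlen : pvL.length = 729 := by rw [pvL_eq, List.length_map, List.length_range]
  rw [if_pos (by rw [hlen]; omega)]
  rw [pvL_eq]
  have hlt : (var - 0 - 1).toNat < 729 := by omega
  rw [List.getElem?_map, List.getElem?_range hlt]
  simp only [Option.map_some, Option.getD_some]
  congr 1
  rw [Int.ofNat_eq_natCast]
  omega
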